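-- pv_equiv track=rewrite | github.com/reynaldocv/leetcode | 2000 - 2999/2294. [Medium] Partition Array Such That Maximum Difference Is K.py | partitionArray
-- ===== SOURCE A (Python) =====
-- from typing import List
--
-- def partitionArray(nums: List[int], k: int) -> int:
--     nums.sort()
--     last = nums[0] - 1
--
--     ans = 0
--
--     for num in nums:
--         if last < num:
--             ans += 1
--             last = num + k
--
--     return ans
-- ===== SOURCE B (Python) =====
-- from typing import List
--
-- def partitionArray(nums: List[int], k: int) -> int:
--     nums.sort()
--     n = len(nums)
--     i = 0
--     ans = 0
--     while i < n:
--         ans += 1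
--         target = nums[i] + k
--         # first index > i whose value exceeds target (binary search)
--         lo, hi = i + 1, n
--         while lo < hi:
--             mid = (lo + hi) // 2
--             if nums[mid] <= target:
--                 lo = mid + 1
--             else:
--                 hi = mid
--         i = lo
--     return ans
-- ===== Notes on version B (the rewrite author's own statement) =====
-- stated objective: alternative
-- what changed: Instead of scanning every sorted element against a running `last` sentinel, B jumps from one partition start directly to the next via a hand-written binary search (first index whose value exceeds start+k), doing O(log n) work per partition instead of O(1) per element.
-- outside the precondition, e.g. on partitionArray([], 0): A raises IndexError, B returns 0
import Mathlib
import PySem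

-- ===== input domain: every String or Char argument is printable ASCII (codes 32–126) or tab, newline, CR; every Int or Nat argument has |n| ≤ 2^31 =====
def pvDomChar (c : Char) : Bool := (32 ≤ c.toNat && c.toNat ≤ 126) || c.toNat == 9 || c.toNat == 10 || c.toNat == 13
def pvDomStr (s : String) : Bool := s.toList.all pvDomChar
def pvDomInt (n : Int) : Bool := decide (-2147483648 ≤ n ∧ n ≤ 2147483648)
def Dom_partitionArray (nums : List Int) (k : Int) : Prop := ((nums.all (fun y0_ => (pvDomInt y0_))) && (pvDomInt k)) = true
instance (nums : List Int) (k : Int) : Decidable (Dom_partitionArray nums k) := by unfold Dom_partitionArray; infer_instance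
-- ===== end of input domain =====

-- B replaces A's element-by-element sentinel scan of the sorted array by binary-search
-- jumps from one partition start to the next (alternative decomposition; both sort first).
-- Both A and B sort `nums` in place (same observable mutation); the claim is about the return value.

-- ===== PORT A =====
def aStep (k : Int) (st : Int × Int) (num : Int) : Int × Int :=
  if st.1 < num then (num + k, st.2 + 1) else st

def partitionArray (nums : List Int) (k : Int) : Int :=
  let s := PySem.List.sorted nums (fun x => x) false
  match PySem.List.pyGet? s 0 with
  | none => 0  -- nums = []: Python raises IndexError here; excluded by Pre_
  | some h0 => (s.foldl (aStep k) (h0 - 1, 0)).2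

-- ===== PORT B =====
-- inner while-loop of Source B: first index in [lo, hi) whose value exceeds t (else hi);
-- fuel (≥ hi - lo at every call) only makes the recursion structural, it is never exhausted
def bsearch (s : List Int) (t : Int) : Nat → Nat → Nat → Nat
  | 0, lo, _hi => lo
  | fuel + 1, lo, hi =>
    if lo < hi then
      if s.getD ((lo + hi) / 2) 0 ≤ t then bsearch s t fuel ((lo + hi) / 2 + 1) hi
      else bsearch s t fuel lo ((lo + hi) / 2)
    else lo

-- outer while-loop of Source B; fuel (≥ n - i at every call) only makes the recursion structural
def altLoop (s : List Int) (k : Int) (n : Nat) : Nat → Nat → Int → Int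
  | 0, _i, ans => ans
  | fuel + 1, i, ans =>
    if i < n then
      altLoop s k n fuel (bsearch s (s.getD i 0 + k) (n - (i + 1)) (i + 1) n) (ans + 1)
    else ans

def partitionArray_alt (nums : List Int) (k : Int) : Int :=
  let s := PySem.List.sorted nums (fun x => x) false
  altLoop s k s.length s.length 0 0

-- ===== PRECONDITION & SPEC =====
-- Pre_ excludes only the empty list, on which A raises IndexError (nums[0]).
def Pre_partitionArray (nums : List Int) (k : Int) : Prop := nums ≠ []
instance (nums : List Int) (k : Int) : Decidable (Pre_partitionArray nums k) := by unfold Pre_partitionArray; infer_instance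
def pvWitness_partitionArray : List Int × Int := ([3, 6, 1, 2, 5], 2)

def Spec_partitionArray (nums : List Int) (k : Int) (out : Int) : Prop := out = partitionArray_alt nums k
instance (nums : List Int) (k : Int) (out : Int) : Decidable (Spec_partitionArray nums k out) := by unfold Spec_partitionArray; infer_instance

-- ===== CLAIM (what is proved, stated in full; the proofs are below) =====
def Claim_equal_partitionArray : Prop := ∀ (nums : List Int) (k : Int), Dom_partitionArray nums k → Pre_partitionArray nums k → Spec_partitionArray nums k (partitionArray nums k)

-- ===== LEMMAS AND PROOFS =====

theorem bsearch_ge (s : List Int) (t : Int) :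
    ∀ (fuel lo hi : Nat), lo ≤ bsearch s t fuel lo hi := by
  intro fuel
  induction fuel with
  | zero => intro lo hi; exact le_rfl
  | succ f ih =>
    intro lo hi
    rw [bsearch]
    split_ifs with h1 h2
    · exact le_trans (by omega) (ih ((lo + hi) / 2 + 1) hi)
    · exact ih lo ((lo + hi) / 2)
    · exact le_rfl

theorem bsearch_le (s : List Int) (t : Int) :
    ∀ (fuel lo hi : Nat), lo ≤ hi → bsearch s t fuel lo hi ≤ hi := by
  intro fuel
  induction fuel with
  | zero => intro lo hi h; exact h
  | succ f ih =>
    intro lo hi h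
    rw [bsearch]
    split_ifs with h1 h2
    · exact ih ((lo + hi) / 2 + 1) hi (by omega)
    · exact le_trans (ih lo ((lo + hi) / 2) (by omega)) (by omega)
    · exact h

-- every index the search skips holds a value ≤ t, and the index it lands on (if < hi) holds a value > t
theorem bsearch_spec (s : List Int) (t : Int)
    (hmono : ∀ p q : Nat, p ≤ q → q < s.length → s.getD p 0 ≤ s.getD q 0) :
    ∀ (fuel lo hi : Nat), hi - lo ≤ fuel → hi ≤ s.length →
    (∀ j : Nat, lo ≤ j → j < bsearch s t fuel lo hi → s.getD j 0 ≤ t) ∧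
    (bsearch s t fuel lo hi < hi → t < s.getD (bsearch s t fuel lo hi) 0) := by
  intro fuel
  induction fuel with
  | zero =>
    intro lo hi hf hhi
    exact ⟨fun j h1 h2 => by simp [bsearch] at h2; omega,
           fun h => by simp [bsearch] at h; omega⟩
  | succ f ih =>
    intro lo hi hf hhi
    rw [bsearch]
    by_cases h1 : lo < hi
    · rw [if_pos h1]
      by_cases h2 : s.getD ((lo + hi) / 2) 0 ≤ t
      · rw [if_pos h2]
        obtain ⟨ih1, ih2⟩ := ih ((lo + hi) / 2 + 1) hi (by omega) hhi
        refine ⟨fun j hj1 hj2 => ?_, ih2⟩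
        by_cases hjm : (lo + hi) / 2 + 1 ≤ j
        · exact ih1 j hjm hj2
        · exact le_trans (hmono j ((lo + hi) / 2) (by omega) (by omega)) h2
      · rw [if_neg h2]
        obtain ⟨ih1, ih2⟩ := ih lo ((lo + hi) / 2) (by omega) (by omega)
        have hr := bsearch_le s t f lo ((lo + hi) / 2) (by omega)
        refine ⟨ih1, fun _ => ?_⟩
        rcases Nat.lt_or_ge (bsearch s t f lo ((lo + hi) / 2)) ((lo + hi) / 2) with h | h
        · exact ih2 h
        · have he : bsearch s t f lo ((lo + hi) / 2) = (lo + hi) / 2 := by omega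
          rw [he]; omega
    · rw [if_neg h1]
      exact ⟨fun j hj1 hj2 => by omega, fun h => by omega⟩

-- A's fold skips a block of elements all ≤ the current `last`
theorem foldl_aStep_skip (k last ans : Int) (l : List Int)
    (h : ∀ x ∈ l, x ≤ last) :
    l.foldl (aStep k) (last, ans) = (last, ans) := by
  induction l with
  | nil => rfl
  | cons x xs ih =>
    have hx : ¬ (last < x) := not_lt.mpr (h x (List.mem_cons_self))
    simp only [List.foldl_cons, aStep, hx, if_false]
    exact ih (fun y hy => h y (List.mem_cons_of_mem _ hy))

-- main loop correspondence on the sorted list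
theorem main_lemma (s : List Int) (k : Int)
    (hmono : ∀ p q : Nat, p ≤ q → q < s.length → s.getD p 0 ≤ s.getD q 0) :
    ∀ (fuel i : Nat), s.length - i ≤ fuel → i ≤ s.length →
    ∀ last ans : Int, (i < s.length → last < s.getD i 0) →
    ((s.drop i).foldl (aStep k) (last, ans)).2 = altLoop s k s.length fuel i ans := by
  intro fuel
  induction fuel with
  | zero =>
    intro i hf hi last ans _
    rw [List.drop_eq_nil_of_le (by omega)]
    rfl
  | succ f ih =>
    intro i hf hi last ans hlast
    by_cases hilt : i < s.length
    · have hdrop : s.drop i = s.getD i 0 :: s.drop (i + 1) := by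
        rw [List.getD_eq_getElem s 0 hilt]
        exact List.drop_eq_getElem_cons hilt
      set t := s.getD i 0 + k with ht
      set r := bsearch s t (s.length - (i + 1)) (i + 1) s.length with hr
      have hrge : i + 1 ≤ r := bsearch_ge s t _ (i + 1) s.length
      have hrle : r ≤ s.length := bsearch_le s t _ (i + 1) s.length (by omega)
      obtain ⟨hskip, hland⟩ := bsearch_spec s t hmono (s.length - (i + 1)) (i + 1) s.length le_rfl le_rfl
      have hsplit : s.drop (i + 1) = (s.drop (i + 1)).take (r - (i + 1)) ++ s.drop r := by
        conv_lhs => rw [← List.take_append_drop (r - (i + 1)) (s.drop (i + 1))]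
        rw [List.drop_drop, Nat.add_sub_cancel' hrge]
      have hblock : ∀ x ∈ (s.drop (i + 1)).take (r - (i + 1)), x ≤ t := by
        intro x hx
        rw [List.mem_take_iff_getElem] at hx
        obtain ⟨j, hj, hxe⟩ := hx
        have hjlen : i + 1 + j < s.length := by
          have := hj.trans_le (min_le_right _ _)
          simp only [List.length_drop] at this
          omega
        have hxg : x = s.getD (i + 1 + j) 0 := by
          rw [← hxe, List.getD_eq_getElem s 0 hjlen, List.getElem_drop]
        rw [hxg]
        exact hskip (i + 1 + j) (by omega) (by omega)
      have hstep : aStep k (last, ans) (s.getD i 0) = (t, ans + 1) := by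
        simp only [aStep]
        rw [if_pos (hlast hilt)]
      rw [hdrop]
      simp only [List.foldl_cons]
      rw [hstep, hsplit, List.foldl_append, foldl_aStep_skip k t (ans + 1) _ hblock]
      conv_rhs => rw [altLoop]
      rw [if_pos hilt]
      have hfr : s.length - r ≤ f := by omega
      exact ih r hfr hrle t (ans + 1) (fun h => hland h)
    · rw [List.drop_eq_nil_of_le (by omega)]
      conv_rhs => rw [altLoop]
      rw [if_neg hilt]
      rfl

-- ===== VERDICT (by name: the statement is the Claim_ definition above) =====
theorem partitionArray_spec : Claim_equal_partitionArray := by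
  intro nums k _ hpre
  unfold Spec_partitionArray
  simp only [partitionArray, partitionArray_alt]
  set s := PySem.List.sorted nums (fun x => x) false with hs
  have hsne : s ≠ [] := by
    rw [hs, Ne, PySem.List.sorted_eq_nil_iff]
    exact hpre
  have hslen : 0 < s.length := List.length_pos_iff.mpr hsne
  have hget : PySem.List.pyGet? s 0 = some (s.getD 0 0) := by
    rw [List.getD_eq_getElem s 0 hslen]
    simp [PySem.List.pyGet?, PySem.List.pyIdx?, hslen]
  have hmono : ∀ p q : Nat, p ≤ q → q < s.length → s.getD p 0 ≤ s.getD q 0 := by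
    intro p q hpq hq
    rw [List.getD_eq_getElem s 0 (by omega), List.getD_eq_getElem s 0 hq]
    exact PySem.List.sorted_id_getElem_mono nums hpq hq
  rw [hget]
  have hm := main_lemma s k hmono s.length 0 (by omega) (by omega)
      (s.getD 0 0 - 1) 0 (fun _ => by omega)
  simpa using hm
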